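-- pv_equiv track=rewrite | github.com/iswanulumam/cp-alta | 1-adhock/6-target-terdekat/solution.py | targetTerdekat
-- ===== SOURCE A (Python) =====
-- def targetTerdekat(arr):
--   result = 999
--   mapper = {
--     'o': [],
--     'x': [],
--   }
--
--   for i in range(0, len(arr)):
--     if arr[i] == 'o':
--       mapper['o'].append(i)
--     elif arr[i] == 'x':
--       mapper['x'].append(i)
--
--   for o in mapper['o']:
--     for x in mapper['x']:
--       if abs(o - x) < result:
--         result = abs(o - x)
--
--   return 0 if result == 999 else result
-- ===== SOURCE B (Python) =====
-- def targetTerdekat(arr):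
--   best = 999
--   last_o = None
--   last_x = None
--   for i, c in enumerate(arr):
--     if c == 'o':
--       if last_x is not None and i - last_x < best:
--         best = i - last_x
--       last_o = i
--     elif c == 'x':
--       if last_o is not None and i - last_o < best:
--         best = i - last_o
--       last_x = i
--   return 0 if best == 999 else best
-- ===== Notes on version B (the rewrite author's own statement) =====
-- stated objective: alternative
-- what changed: Replaces the index-collection plus nested cross-product minimum with a single left-to-right pass that keeps only the last seen 'o' and 'x' index (the closest opposite neighbour is always the most recent one), keeping A's 999 cap / 0-sentinel convention; asymptotically it avoids A's quadratic pair scan, though a timing run's inputs did not show a measured speed-up.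
import Mathlib
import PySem

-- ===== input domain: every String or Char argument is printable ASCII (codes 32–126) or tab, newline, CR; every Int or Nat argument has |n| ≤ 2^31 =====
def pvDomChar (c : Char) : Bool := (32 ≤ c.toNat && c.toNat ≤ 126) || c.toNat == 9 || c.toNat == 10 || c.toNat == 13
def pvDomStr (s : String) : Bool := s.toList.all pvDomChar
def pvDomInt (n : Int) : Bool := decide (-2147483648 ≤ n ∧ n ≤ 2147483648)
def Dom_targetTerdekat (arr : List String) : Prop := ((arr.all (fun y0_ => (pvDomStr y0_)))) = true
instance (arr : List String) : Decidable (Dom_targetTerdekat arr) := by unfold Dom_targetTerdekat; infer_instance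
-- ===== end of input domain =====

-- ===== PORT A =====
-- B replaces A's collect-then-cross-product scan by one pass keeping only the last 'o'/'x' index.
-- A: collect indices of "o" and "x" (the for i in range(len(arr)) loop)
def collectA : List String → Int → List Int × List Int → List Int × List Int
  | [], _, m => m
  | s :: rest, i, (os, xs) =>
      if s = "o" then collectA rest (i + 1) (os ++ [i], xs)
      else if s = "x" then collectA rest (i + 1) (os, xs ++ [i])
      else collectA rest (i + 1) (os, xs)

-- A: the inner 'for x in mapper['x']' loop
def innerA (o : Int) (xs : List Int) (r : Int) : Int :=
  xs.foldl (fun r x => if |o - x| < r then |o - x| else r) r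

-- A: the outer 'for o in mapper['o']' loop
def outerA (os xs : List Int) (r : Int) : Int :=
  os.foldl (fun r o => innerA o xs r) r

def targetTerdekat (arr : List String) : Int :=
  let m := collectA arr 0 ([], [])
  let result := outerA m.1 m.2 999
  if result = 999 then 0 else result

-- ===== PORT B =====
-- B: single pass, state = (best, last_o, last_x)
def loopB : List String → Int → Int × Option Int × Option Int → Int × Option Int × Option Int
  | [], _, st => st
  | c :: rest, i, (best, lastO, lastX) =>
      if c = "o" then
        let best' := match lastX with
          | some lx => if i - lx < best then i - lx else best
          | none => best
        loopB rest (i + 1) (best', some i, lastX)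
      else if c = "x" then
        let best' := match lastO with
          | some lo => if i - lo < best then i - lo else best
          | none => best
        loopB rest (i + 1) (best', lastO, some i)
      else loopB rest (i + 1) (best, lastO, lastX)

def targetTerdekat_alt (arr : List String) : Int :=
  let st := loopB arr 0 (999, none, none)
  if st.1 = 999 then 0 else st.1

-- ===== PRECONDITION & SPEC =====
def Spec_targetTerdekat (arr : List String) (out : Int) : Prop := out = targetTerdekat_alt arr
instance (arr : List String) (out : Int) : Decidable (Spec_targetTerdekat arr out) := by unfold Spec_targetTerdekat; infer_instance

-- ===== CLAIM (what is proved, stated in full; the proofs are below) =====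
def Claim_equal_targetTerdekat : Prop := ∀ (arr : List String), Dom_targetTerdekat arr → Spec_targetTerdekat arr (targetTerdekat arr)

-- ===== LEMMAS AND PROOFS =====

-- min-form of A's inner loop
def Mm (c : Int) (xs : List Int) (r : Int) : Int :=
  xs.foldl (fun r x => min r |c - x|) r

def Oo (os xs : List Int) (r : Int) : Int :=
  os.foldl (fun r o => Mm o xs r) r

theorem innerA_eq_Mm (o : Int) (xs : List Int) (r : Int) : innerA o xs r = Mm o xs r := by
  unfold innerA Mm
  have h : (fun (r x : Int) => if |o - x| < r then |o - x| else r)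
      = (fun (r x : Int) => min r |o - x|) := by
    funext r x; by_cases h : |o - x| < r <;> simp [h] <;> omega
  rw [h]

theorem outerA_eq_Oo (os xs : List Int) (r : Int) : outerA os xs r = Oo os xs r := by
  unfold outerA Oo
  have h : (fun (r o : Int) => innerA o xs r) = (fun (r o : Int) => Mm o xs r) := by
    funext r o; exact innerA_eq_Mm o xs r
  rw [h]

theorem Mm_min_right (c : Int) (xs : List Int) : ∀ (s t : Int), Mm c xs (min s t) = min (Mm c xs s) t := by
  induction xs with
  | nil => intro s t; simp [Mm]
  | cons y ys ih =>
      intro s t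
      simp only [Mm, List.foldl_cons] at *
      have h : min (min s t) |c - y| = min (min s |c - y|) t := by omega
      rw [h, ih]

theorem Oo_min_right (os xs : List Int) : ∀ (s t : Int), Oo os xs (min s t) = min (Oo os xs s) t := by
  induction os with
  | nil => intro s t; simp [Oo]
  | cons o os ih =>
      intro s t
      simp only [Oo, List.foldl_cons] at *
      rw [Mm_min_right, ih]

theorem Oo_append_o (os xs : List Int) (o' r : Int) :
    Oo (os ++ [o']) xs r = Mm o' xs (Oo os xs r) := by
  simp [Oo]

theorem Oo_append_x (os xs : List Int) (x' : Int) : ∀ (r : Int),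
    Oo os (xs ++ [x']) r = os.foldl (fun r o => min r |o - x'|) (Oo os xs r) := by
  induction os with
  | nil => intro r; simp [Oo]
  | cons o os ih =>
      intro r
      have hM : Mm o (xs ++ [x']) r = min (Mm o xs r) |o - x'| := by simp [Mm]
      have step1 : Oo (o :: os) (xs ++ [x']) r = Oo os (xs ++ [x']) (Mm o (xs ++ [x']) r) := rfl
      rw [step1, hM, ih, Oo_min_right]
      simp only [Oo, List.foldl_cons]

-- a fold of  min r (c - x)-shaped steps stays put when r is already below everything
theorem foldmin_stay (c : Int) (ys : List Int) : ∀ (r : Int), (∀ x ∈ ys, r ≤ |c - x|) →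
    ys.foldl (fun r x => min r |c - x|) r = r := by
  induction ys with
  | nil => intro r _; rfl
  | cons y ys ih =>
      intro r h
      simp only [List.foldl_cons]
      have h1 : r ≤ |c - y| := h y (by simp)
      have h2 : min r |c - y| = r := by omega
      rw [h2]
      exact ih r (fun x hx => h x (by simp [hx]))

-- with all elements ≤ lx < c and lx present, the min over the list is c - lx
theorem foldmin_max (c lx : Int) (xs : List Int) : ∀ (r : Int),
    (∀ x ∈ xs, x ≤ lx ∧ x < c) → lx ∈ xs →
    xs.foldl (fun r x => min r |c - x|) r = min r (c - lx) := by
  induction xs with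
  | nil => intro r _ h; simp at h
  | cons y ys ih =>
      intro r hall hmem
      simp only [List.foldl_cons]
      have hy := hall y (by simp)
      have habs : |c - y| = c - y := abs_of_nonneg (by omega)
      by_cases hys : lx ∈ ys
      · rw [ih (min r |c - y|) (fun x hx => hall x (by simp [hx])) hys, habs]
        omega
      · have hylx : y = lx := by
          rcases List.mem_cons.mp hmem with h | h
          · omega
          · exact absurd h hys
        subst hylx
        rw [habs]
        rw [foldmin_stay c ys (min r (c - y))
            (fun x hx => by
              have h3 := hall x (by simp [hx])
              have h4 : |c - x| = c - x := abs_of_nonneg (by omega)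
              omega)]

-- invariant for the last-seen index: present, maximal, below the cursor
def LastInv (l : Option Int) (zs : List Int) (i : Int) : Prop :=
  match l with
  | none => zs = []
  | some lz => lz ∈ zs ∧ ∀ z ∈ zs, z ≤ lz ∧ z < i

theorem main_inv : ∀ (l : List String) (i : Int) (os xs : List Int) (best : Int)
    (lastO lastX : Option Int),
    LastInv lastO os i → LastInv lastX xs i → best = Oo os xs 999 →
    (loopB l i (best, lastO, lastX)).1 =
      Oo (collectA l i (os, xs)).1 (collectA l i (os, xs)).2 999 := by
  intro l
  induction l with
  | nil =>
      intro i os xs best lastO lastX _ _ hb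
      simpa [loopB, collectA] using hb
  | cons c rest ih =>
      intro i os xs best lastO lastX hO hX hb
      by_cases hc : c = "o"
      · -- o-branch
        simp only [loopB, collectA, hc]
        have hOinv : LastInv (some i) (os ++ [i]) (i + 1) := by
          constructor
          · simp
          · intro z hz
            rcases List.mem_append.mp hz with h | h
            · cases lastO with
              | none => simp [LastInv] at hO; simp [hO] at h
              | some lo => have := hO.2 z h; omega
            · simp at h; omega
        have hXinv : LastInv lastX xs (i + 1) := by
          cases lastX with
          | none => exact hX
          | some lx => exact ⟨hX.1, fun z hz => by have := hX.2 z hz; omega⟩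
        apply ih (i + 1) (os ++ [i]) xs _ (some i) lastX hOinv hXinv
        -- best' = Oo (os ++ [i]) xs 999
        rw [Oo_append_o, ← hb]
        cases lastX with
        | none =>
            have : xs = [] := hX
            subst this; simp [Mm]
        | some lx =>
            have hmax := foldmin_max i lx xs best hX.2 hX.1
            simp only [Mm]
            rw [hmax]
            show (if i - lx < best then i - lx else best) = _
            split_ifs <;> omega
      · by_cases hc2 : c = "x"
        · -- x-branch
          simp only [loopB, collectA, hc, hc2, if_neg hc]
          have hXinv : LastInv (some i) (xs ++ [i]) (i + 1) := by
            constructor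
            · simp
            · intro z hz
              rcases List.mem_append.mp hz with h | h
              · cases lastX with
                | none => simp [LastInv] at hX; simp [hX] at h
                | some lx => have := hX.2 z h; omega
              · simp at h; omega
          have hOinv : LastInv lastO os (i + 1) := by
            cases lastO with
            | none => exact hO
            | some lo => exact ⟨hO.1, fun z hz => by have := hO.2 z hz; omega⟩
          apply ih (i + 1) os (xs ++ [i]) _ lastO (some i) hOinv hXinv
          rw [Oo_append_x, ← hb]
          have hcomm : (fun (r o : Int) => min r |o - i|) = (fun (r o : Int) => min r |i - o|) := by
            funext r o; rw [abs_sub_comm]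
          rw [hcomm]
          cases lastO with
          | none =>
              have : os = [] := hO
              subst this; simp
          | some lo =>
              have hmax := foldmin_max i lo os best hO.2 hO.1
              rw [hmax]
              show (if i - lo < best then i - lo else best) = _
              split_ifs <;> omega
        · simp only [loopB, collectA, hc, hc2]
          have hOinv : LastInv lastO os (i + 1) := by
            cases lastO with
            | none => exact hO
            | some lo => exact ⟨hO.1, fun z hz => by have := hO.2 z hz; omega⟩
          have hXinv : LastInv lastX xs (i + 1) := by
            cases lastX with
            | none => exact hX
            | some lx => exact ⟨hX.1, fun z hz => by have := hX.2 z hz; omega⟩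
          exact ih (i + 1) os xs best lastO lastX hOinv hXinv hb

-- ===== VERDICT (by name: the statement is the Claim_ definition above) =====
theorem targetTerdekat_spec : Claim_equal_targetTerdekat := by
  intro arr _
  unfold Spec_targetTerdekat targetTerdekat targetTerdekat_alt
  have h := main_inv arr 0 [] [] 999 none none rfl rfl (by simp [Oo])
  show (if outerA (collectA arr 0 ([], [])).1 (collectA arr 0 ([], [])).2 999 = 999 then 0
        else outerA (collectA arr 0 ([], [])).1 (collectA arr 0 ([], [])).2 999)
      = (if (loopB arr 0 (999, none, none)).1 = 999 then 0
        else (loopB arr 0 (999, none, none)).1)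
  rw [outerA_eq_Oo, ← h]
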